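-- pv_equiv track=rewrite | github.com/CDCgov/dibbs-ecr-diff | prototype/diff_prototype.py | _xpath_literal
-- ===== SOURCE A (Python) =====
-- def _xpath_literal(s: str) -> str:
--     """
--     Wrap s in XPath-safe quotes.  Falls back to concat() when s contains both
--     single and double quotes.
--     """
--     if "'" not in s:
--         return f"'{s}'"
--     if '"' not in s:
--         return f'"{s}"'
--     parts = []
--     for chunk in s.split("'"):
--         if chunk:
--             parts.append(f"'{chunk}'")
--         parts.append('"\'"')
--     if parts and parts[-1] == '"\'"':
--         parts.pop()
--     return "concat(" + ",".join(parts) + ")"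
-- ===== SOURCE B (Python) =====
-- def _xpath_literal(s: str) -> str:
--     """
--     Wrap s in XPath-safe quotes.  Falls back to concat() when s contains both
--     single and double quotes.
--     """
--     if "'" not in s:
--         return f"'{s}'"
--     if '"' not in s:
--         return f'"{s}"'
--     # Single left-to-right tokenizer: a token is either a lone single quote
--     # (emitted as "'") or a maximal run of non-quote characters (emitted
--     # wrapped in single quotes).  No empty chunks arise, so no pop is needed.
--     parts = []
--     i, n = 0, len(s)
--     while i < n:
--         if s[i] == "'":
--             parts.append('"\'"')
--             i += 1
--         else:
--             j = i
--             while j < n and s[j] != "'":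
--                 j += 1
--             parts.append(f"'{s[i:j]}'")
--             i = j
--     return "concat(" + ",".join(parts) + ")"
-- ===== Notes on version B (the rewrite author's own statement) =====
-- stated objective: simpler
-- what changed: Replaces split-on-quote with conditional append plus trailing pop by a single left-to-right tokenizer that emits each lone quote or maximal non-quote run directly, so no empty chunks and no pop-fixup ever arise.
import Mathlib
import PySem

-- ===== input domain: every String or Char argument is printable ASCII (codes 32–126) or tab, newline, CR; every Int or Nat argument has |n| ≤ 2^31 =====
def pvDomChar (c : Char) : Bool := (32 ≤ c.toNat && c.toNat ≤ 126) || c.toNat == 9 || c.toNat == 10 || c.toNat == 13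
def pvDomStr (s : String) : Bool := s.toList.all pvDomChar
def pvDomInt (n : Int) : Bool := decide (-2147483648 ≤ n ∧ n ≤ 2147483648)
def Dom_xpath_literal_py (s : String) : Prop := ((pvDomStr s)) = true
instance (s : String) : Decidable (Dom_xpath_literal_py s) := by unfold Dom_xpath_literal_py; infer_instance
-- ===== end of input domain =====

-- B replaces A's split/conditional-append/pop pipeline by a single left-to-right
-- tokenizer (lone quote or maximal non-quote run), for simplicity; same cost.

-- ===== PORT A =====
-- literal port of A: split on "'", quote non-empty chunks, separator token after
-- each chunk, then pop the trailing separator token.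
def xpath_literal_py (s : String) : String :=
  if !(PySem.Str.isIn "'" s) then "'" ++ s ++ "'"
  else if !(PySem.Str.isIn "\"" s) then "\"" ++ s ++ "\""
  else
    let chunks : List String := (PySem.Chars.splitOn s.toList ['\'']).map String.ofList
    let parts : List String := chunks.foldl
      (fun acc chunk =>
        (if chunk ≠ "" then acc ++ ["'" ++ chunk ++ "'"] else acc) ++ ["\"'\""]) []
    let parts := if parts ≠ [] ∧ parts.getLast? = some "\"'\"" then parts.dropLast else parts
    "concat(" ++ PySem.Str.join "," parts ++ ")"

-- ===== PORT B =====
-- B's tokenizer: a lone single quote, or a maximal run of non-quote characters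
-- (the inner index scan `while j < n and s[j] != "'"` is takeWhile/dropWhile).
def pvTokensB : List Char → List String
  | [] => []
  | c :: r =>
    if c = '\'' then "\"'\"" :: pvTokensB r
    else ("'" ++ String.ofList ((c :: r).takeWhile (· ≠ '\'')) ++ "'")
           :: pvTokensB ((c :: r).dropWhile (· ≠ '\''))
termination_by cs => cs.length
decreasing_by
  · simp
  · simp only [List.dropWhile_cons]
    split
    · exact Nat.lt_succ_of_le (List.length_dropWhile_le _ r)
    · simp_all

def xpath_literal_py_alt (s : String) : String :=
  if !(PySem.Str.isIn "'" s) then "'" ++ s ++ "'"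
  else if !(PySem.Str.isIn "\"" s) then "\"" ++ s ++ "\""
  else "concat(" ++ PySem.Str.join "," (pvTokensB s.toList) ++ ")"

-- ===== PRECONDITION & SPEC =====
def Spec_xpath_literal_py (s : String) (out : String) : Prop := out = xpath_literal_py_alt s
instance (s : String) (out : String) : Decidable (Spec_xpath_literal_py s out) := by unfold Spec_xpath_literal_py; infer_instance

-- ===== CLAIM (what is proved, stated in full; the proofs are below) =====
def Claim_equal_xpath_literal_py : Prop := ∀ (s : String), Dom_xpath_literal_py s → Spec_xpath_literal_py s (xpath_literal_py s)

-- ===== LEMMAS AND PROOFS =====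

-- proof-side model of A's split("'"): accumulator form of splitting on a single char
def pvSplitQA (q : Char) (cur : List Char) : List Char → List (List Char)
  | [] => [cur.reverse]
  | c :: r => if c = q then cur.reverse :: pvSplitQA q [] r else pvSplitQA q (c :: cur) r

def pvTailSplit (q : Char) : List Char → List (List Char)
  | [] => []
  | _ :: r => pvSplitQA q [] r

-- per-chunk contribution of A's loop body (String level and List Char level)
def pvGS (c : String) : List String :=
  (if c ≠ "" then ["'" ++ c ++ "'"] else []) ++ ["\"'\""]

def pvGC (l : List Char) : List String :=
  (if l ≠ [] then ["'" ++ String.ofList l ++ "'"] else []) ++ ["\"'\""]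

lemma pvSplitOn_go_single (q : Char) :
    ∀ (fuel : Nat) (l cur : List Char) (acc : List (List Char)), l.length < fuel →
      PySem.Chars.splitOn.go [q] fuel l cur acc = acc.reverse ++ pvSplitQA q cur l := by
  intro fuel
  induction fuel with
  | zero => intro l cur acc h; omega
  | succ fuel ih =>
    intro l cur acc h
    cases l with
    | nil => simp [PySem.Chars.splitOn.go, pvSplitQA]
    | cons c rest =>
      simp only [PySem.Chars.splitOn.go, List.isPrefixOf, Bool.and_true]
      by_cases hc : c = q
      · subst hc
        simp only [BEq.rfl, if_pos, List.length_cons, List.drop_succ_cons, List.length_nil,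
          List.drop_zero]
        rw [ih rest [] (cur.reverse :: acc) (by simpa using Nat.lt_of_succ_lt_succ h)]
        simp [pvSplitQA]
      · have : (q == c) = false := by simp; exact fun h' => hc h'.symm
        simp only [this, Bool.false_eq_true, if_neg, not_false_iff]
        rw [ih rest (c :: cur) acc (by simpa using Nat.lt_of_succ_lt_succ h)]
        simp [pvSplitQA, hc]

lemma pvSplitOn_single (q : Char) (cs : List Char) :
    PySem.Chars.splitOn cs [q] = pvSplitQA q [] cs := by
  unfold PySem.Chars.splitOn
  rw [pvSplitOn_go_single q (cs.length + 1) cs [] [] (by omega)]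
  simp

lemma pvSplitQA_char (q : Char) :
    ∀ (cs cur : List Char),
      pvSplitQA q cur cs =
        (cur.reverse ++ cs.takeWhile (· ≠ q)) :: pvTailSplit q (cs.dropWhile (· ≠ q)) := by
  intro cs
  induction cs with
  | nil => intro cur; simp [pvSplitQA, pvTailSplit]
  | cons c r ih =>
    intro cur
    by_cases hc : c = q
    · subst hc
      simp [pvSplitQA, pvTailSplit]
    · simp only [pvSplitQA, if_neg hc]
      rw [ih (c :: cur)]
      simp [hc]

lemma pvFlatMap_gC_ne_nil (l : List (List Char)) (h : l ≠ []) : l.flatMap pvGC ≠ [] := by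
  cases l with
  | nil => exact absurd rfl h
  | cons a t =>
    simp only [List.flatMap_cons, pvGC]
    intro hcontra
    rcases List.append_eq_nil_iff.mp hcontra with ⟨h1, _⟩
    rcases List.append_eq_nil_iff.mp h1 with ⟨_, h3⟩
    exact List.cons_ne_nil _ _ h3

lemma pvDropWhile_head (p : Char → Bool) :
    ∀ (cs : List Char) {d0 : Char} {d1 : List Char},
      cs.dropWhile p = d0 :: d1 → p d0 = false := by
  intro cs
  induction cs with
  | nil => intro d0 d1 h; simp at h
  | cons c r ih =>
    intro d0 d1 h
    rw [List.dropWhile_cons] at h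
    split at h
    · exact ih h
    · cases h; simp_all

-- the heart: A's flatMap-of-chunks with the trailing separator dropped is B's token list
lemma pvSplitQA_ne_nil (q : Char) : ∀ (cs cur : List Char), pvSplitQA q cur cs ≠ [] := by
  intro cs
  induction cs with
  | nil => intro cur; simp [pvSplitQA]
  | cons c r ih =>
    intro cur
    by_cases hc : c = q
    · simp [pvSplitQA, hc]
    · simpa [pvSplitQA, hc] using ih (c :: cur)

lemma pvMain : ∀ (n : Nat) (cs : List Char), cs.length ≤ n →
    ((pvSplitQA '\'' [] cs).flatMap pvGC).dropLast = pvTokensB cs := by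
  intro n
  induction n with
  | zero =>
    intro cs h
    have : cs = [] := List.length_eq_zero_iff.mp (Nat.le_zero.mp h)
    subst this
    simp [pvSplitQA, pvGC, pvTokensB]
  | succ n ih =>
    intro cs h
    cases cs with
    | nil => simp [pvSplitQA, pvGC, pvTokensB]
    | cons c r =>
      by_cases hc : c = '\''
      · subst hc
        have hne := pvFlatMap_gC_ne_nil _ (pvSplitQA_ne_nil '\'' r [])
        rw [show pvSplitQA '\'' [] ('\'' :: r) = [] :: pvSplitQA '\'' [] r from by
              simp [pvSplitQA],
            List.flatMap_cons, show pvGC [] = ["\"'\""] from rfl, List.singleton_append,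
            List.dropLast_cons_of_ne_nil hne,
            ih r (by simpa using Nat.le_of_succ_le_succ h),
            show pvTokensB ('\'' :: r) = "\"'\"" :: pvTokensB r from by simp [pvTokensB]]
      · have htake : (c :: r).takeWhile (· ≠ '\'') = c :: r.takeWhile (· ≠ '\'') := by
          rw [List.takeWhile_cons, if_pos (by simp [hc])]
        have hdw : (c :: r).dropWhile (· ≠ '\'') = r.dropWhile (· ≠ '\'') := by
          rw [List.dropWhile_cons, if_pos (by simp [hc])]
        have htokB : pvTokensB (c :: r) =
            ("'" ++ String.ofList ((c :: r).takeWhile (· ≠ '\'')) ++ "'")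
              :: pvTokensB ((c :: r).dropWhile (· ≠ '\'')) := by
          simp only [pvTokensB]
          rw [if_neg hc]
        rw [pvSplitQA_char, List.reverse_nil, List.nil_append, htokB, List.flatMap_cons,
            show pvGC ((c :: r).takeWhile (· ≠ '\'')) =
              ["'" ++ String.ofList ((c :: r).takeWhile (· ≠ '\'')) ++ "'", "\"'\""] from by
              rw [htake]; simp [pvGC],
            hdw]
        cases hdrop : r.dropWhile (· ≠ '\'') with
        | nil =>
          simp [pvTailSplit, pvTokensB]
        | cons d0 d1 =>
          have hd0 : d0 = '\'' := by simpa using pvDropWhile_head _ r hdrop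
          subst hd0
          have hlen : d1.length ≤ n := by
            have h1 := List.length_dropWhile_le (fun x => decide (x ≠ '\'')) r
            rw [hdrop] at h1
            simp only [List.length_cons] at h1 h
            omega
          have hne := pvFlatMap_gC_ne_nil _ (pvSplitQA_ne_nil '\'' d1 [])
          rw [show pvTailSplit '\'' ('\'' :: d1) = pvSplitQA '\'' [] d1 from rfl,
              show (["'" ++ String.ofList ((c :: r).takeWhile (· ≠ '\'')) ++ "'", "\"'\""]
                  ++ (pvSplitQA '\'' [] d1).flatMap pvGC).dropLast =
                ["'" ++ String.ofList ((c :: r).takeWhile (· ≠ '\'')) ++ "'", "\"'\""]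
                  ++ ((pvSplitQA '\'' [] d1).flatMap pvGC).dropLast from
                List.dropLast_append_of_ne_nil hne,
              ih d1 hlen,
              show pvTokensB ('\'' :: d1) = "\"'\"" :: pvTokensB d1 from by simp [pvTokensB]]
          rfl

lemma pvFoldl_eq_flatMap (chunks : List String) :
    chunks.foldl
      (fun acc chunk =>
        (if chunk ≠ "" then acc ++ ["'" ++ chunk ++ "'"] else acc) ++ ["\"'\""]) [] =
      chunks.flatMap pvGS := by
  have hstep : (fun (acc : List String) (chunk : String) =>
      (if chunk ≠ "" then acc ++ ["'" ++ chunk ++ "'"] else acc) ++ ["\"'\""]) =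
      fun acc chunk => acc ++ pvGS chunk := by
    funext acc chunk
    by_cases hch : chunk = "" <;> simp [pvGS, hch]
  rw [hstep, PySem.List.foldl_append_eq_flatMap]
  simp

lemma pvMap_flatMap (l : List (List Char)) :
    (l.map String.ofList).flatMap pvGS = l.flatMap pvGC := by
  rw [List.flatMap_map]
  apply List.flatMap_congr
  intro x _
  by_cases hx : x = [] <;> simp [pvGS, pvGC, hx]

lemma pvFlatMap_gC_last (l : List (List Char)) (h : l ≠ []) :
    (l.flatMap pvGC).getLast? = some "\"'\"" := by
  induction l with
  | nil => exact absurd rfl h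
  | cons a t ih =>
    cases t with
    | nil => by_cases ha : a = [] <;> simp [pvGC, ha]
    | cons b u =>
      rw [List.flatMap_cons, List.getLast?_append_of_ne_nil _
        (pvFlatMap_gC_ne_nil (b :: u) (List.cons_ne_nil b u))]
      exact ih (List.cons_ne_nil b u)

-- ===== VERDICT (by name: the statement is the Claim_ definition above) =====
theorem xpath_literal_py_spec : Claim_equal_xpath_literal_py := by
  intro s _
  unfold Spec_xpath_literal_py xpath_literal_py xpath_literal_py_alt
  split
  · rfl
  · split
    · rfl
    · have hchunks := pvSplitOn_single '\'' s.toList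
      have hne := pvSplitQA_ne_nil '\'' s.toList []
      simp only [hchunks, pvFoldl_eq_flatMap, pvMap_flatMap]
      rw [if_pos ⟨pvFlatMap_gC_ne_nil _ hne, pvFlatMap_gC_last _ hne⟩]
      rw [pvMain s.toList.length s.toList le_rfl]
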